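-- pv_equiv track=rewrite | github.com/NicoloMarsucco/advent-of-code-2025 | solutions/day06.py | part1
-- ===== SOURCE A (Python) =====
-- def part1(data: str) -> int:
--     separated = [line.split() for line in data.splitlines()]
--     rows = len(separated)
--     columns = len(separated[0])
--     res = 0
--     for j in range(columns):
--         curr = int(separated[0][j])
--         is_addition = separated[rows-1][j] == "+"
--         for i in range(1,rows-1):
--             if is_addition:
--                 curr += int(separated[i][j])
--             else:
--                 curr *= int(separated[i][j])
--         res += curr
--
--     return res
-- ===== SOURCE B (Python) =====
-- def part1(data: str) -> int:
--     grid = [line.split() for line in data.splitlines()]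
--     ops = grid[-1]
--     sums = [int(x) for x in grid[0]]
--     prods = sums[:]
--     for row in grid[1:-1]:
--         vals = [int(x) for x in row[:len(sums)]]
--         sums = [s + v for s, v in zip(sums, vals)]
--         prods = [p * v for p, v in zip(prods, vals)]
--     return sum(s if op == "+" else p for (s, p), op in zip(zip(sums, prods), ops))
-- ===== Notes on version B (the rewrite author's own statement) =====
-- stated objective: alternative
-- what changed: B streams the grid row-major in a single pass, maintaining per-column running sums AND products simultaneously (seeded from the first row) and only at the end selecting sum or product per column by the operator row; A runs column-major with nested index loops computing one chosen aggregate per column.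
import Mathlib
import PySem

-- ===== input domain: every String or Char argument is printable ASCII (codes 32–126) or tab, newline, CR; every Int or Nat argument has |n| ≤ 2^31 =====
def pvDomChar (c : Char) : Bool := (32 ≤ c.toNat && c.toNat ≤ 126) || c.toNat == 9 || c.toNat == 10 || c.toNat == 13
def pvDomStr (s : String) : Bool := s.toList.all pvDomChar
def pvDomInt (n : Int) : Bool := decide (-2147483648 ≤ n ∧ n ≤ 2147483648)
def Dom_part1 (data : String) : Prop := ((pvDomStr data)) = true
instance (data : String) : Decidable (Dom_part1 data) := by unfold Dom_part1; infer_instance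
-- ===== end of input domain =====

-- B streams the grid row-major in one pass, maintaining per-column running sums and products
-- simultaneously (seeded from the first row) and selecting sum or product per column by the
-- operator row only at the end; A runs column-major with nested index loops
-- (objective: alternative decomposition, same cost).

-- ===== PORT A =====
def part1 (data : String) : Int :=
  let separated := (PySem.Str.splitlines data).map PySem.Str.split₀
  let rows : Int := separated.length
  let columns : Int := (PySem.List.pyGetD separated 0 []).length
  (PySem.List.pyRange 0 columns 1).foldl (fun res j =>
    let curr : Int := (PySem.Int.ofStr? (PySem.List.pyGetD (PySem.List.pyGetD separated 0 []) j "")).getD 0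
    let isAdd : Bool := PySem.List.pyGetD (PySem.List.pyGetD separated (rows - 1) []) j "" == "+"
    let curr := (PySem.List.pyRange 1 (rows - 1) 1).foldl (fun curr i =>
      let v := (PySem.Int.ofStr? (PySem.List.pyGetD (PySem.List.pyGetD separated i []) j "")).getD 0
      if isAdd then curr + v else curr * v) curr
    res + curr) 0

-- ===== PORT B =====
def part1_alt (data : String) : Int :=
  let grid := (PySem.Str.splitlines data).map PySem.Str.split₀
  let ops := PySem.List.pyGetD grid (-1) []
  let sums := (PySem.List.pyGetD grid 0 []).map (fun x => (PySem.Int.ofStr? x).getD 0)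
  let prods := sums
  let sp := (PySem.List.slice grid (some 1) (some (-1))).foldl
    (fun (sp : List Int × List Int) row =>
      let vals := (PySem.List.slice row none (some (sp.1.length : Int))).map
        (fun x => (PySem.Int.ofStr? x).getD 0)
      (List.zipWith (· + ·) sp.1 vals, List.zipWith (· * ·) sp.2 vals))
    (sums, prods)
  (((sp.1.zip sp.2).zip ops)).foldl (fun t x => t + (if x.2 == "+" then x.1.1 else x.1.2)) 0

-- ===== PRECONDITION & SPEC =====
-- Pre_ excludes exactly the inputs on which A raises: no line at all (IndexError), a row shorter
-- than row 0 (IndexError), or a non-integer token in a position A passes to int() — row 0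
-- entirely, and rows 1..n-2 in the first len(row 0) columns (ValueError).
def Pre_part1 (data : String) : Prop :=
  let sep := (PySem.Str.splitlines data).map PySem.Str.split₀
  sep ≠ [] ∧
  (∀ r ∈ sep, (sep.headD []).length ≤ r.length) ∧
  (∀ tok ∈ sep.headD [], (PySem.Int.ofStr? tok).isSome) ∧
  (∀ r ∈ sep.dropLast, ∀ tok ∈ r.take (sep.headD []).length, (PySem.Int.ofStr? tok).isSome)
instance (data : String) : Decidable (Pre_part1 data) := by unfold Pre_part1; infer_instance

def pvWitness_part1 : String := "1 2\n3 4\n+ *"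

def Spec_part1 (data : String) (out : Int) : Prop := out = part1_alt data
instance (data : String) (out : Int) : Decidable (Spec_part1 data out) := by unfold Spec_part1; infer_instance

-- ===== CLAIM (what is proved, stated in full; the proofs are below) =====
def Claim_equal_part1 : Prop := ∀ (data : String), Dom_part1 data → Pre_part1 data → Spec_part1 data (part1 data)

-- ===== LEMMAS AND PROOFS =====

-- value a port extracts from a grid cell
def pvVal (r : List String) (j : Nat) : Int := (PySem.Int.ofStr? (r.getD j "")).getD 0

theorem map_int_take_eq_range (r : List String) (n : Nat) (h : n ≤ r.length) :
    (r.take n).map (fun x => (PySem.Int.ofStr? x).getD 0) = (List.range n).map (fun j => pvVal r j) := by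
  apply List.ext_getElem
  · simp [Nat.min_eq_left h]
  · intro i h1 h2
    simp only [List.getElem_map, List.getElem_take, List.getElem_range]
    have hi : i < n := by simpa [Nat.min_eq_left h] using h2
    have hir : i < r.length := lt_of_lt_of_le hi h
    simp [pvVal, List.getD_eq_getElem?_getD, List.getElem?_eq_getElem hir]

theorem zipWith_map_range {β : Type} (F : Int → Int → β) (f g : Nat → Int) (n : Nat) :
    List.zipWith F ((List.range n).map f) ((List.range n).map g)
    = (List.range n).map (fun j => F (f j) (g j)) := by
  apply List.ext_getElem
  · simp
  · intro i h1 h2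
    simp

theorem foldB_invariant (n : Nat) (rows : List (List String))
    (hlen : ∀ r ∈ rows, n ≤ r.length) (f g : Nat → Int) :
    rows.foldl
      (fun (sp : List Int × List Int) row =>
        let vals := (PySem.List.slice row none (some (sp.1.length : Int))).map
          (fun x => (PySem.Int.ofStr? x).getD 0)
        (List.zipWith (· + ·) sp.1 vals, List.zipWith (· * ·) sp.2 vals))
      ((List.range n).map f, (List.range n).map g)
    = ((List.range n).map (fun j => rows.foldl (fun a r => a + pvVal r j) (f j)),
       (List.range n).map (fun j => rows.foldl (fun a r => a * pvVal r j) (g j))) := by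
  induction rows generalizing f g with
  | nil => simp
  | cons r rs ih =>
    have hr : n ≤ r.length := hlen r List.mem_cons_self
    have hlen' : ∀ r' ∈ rs, n ≤ r'.length := fun r' h => hlen r' (List.mem_cons_of_mem _ h)
    simp only [List.foldl_cons]
    have hlenf : (((List.range n).map f)).length = n := by simp
    rw [hlenf, PySem.List.slice_to_natCast, map_int_take_eq_range r n hr]
    rw [zipWith_map_range (· + ·), zipWith_map_range (· * ·), ih hlen']

theorem zip_map_range_left {β : Type} (h : Nat → β) (n : Nat) (ops : List String)
    (hn : n ≤ ops.length) :
    ((List.range n).map h).zip ops = (List.range n).map (fun j => (h j, ops.getD j "")) := by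
  apply List.ext_getElem
  · simp [Nat.min_eq_left hn]
  · intro i h1 h2
    have hi : i < n := by simpa [Nat.min_eq_left hn] using h1
    have hio : i < ops.length := lt_of_lt_of_le hi hn
    simp [List.getElem_zip, List.getD_eq_getElem?_getD, List.getElem?_eq_getElem hio]

theorem slice_one_neg_one {α : Type} (l : List α) :
    PySem.List.slice l (some 1) (some (-1)) = l.tail.dropLast := by
  unfold PySem.List.slice PySem.List.clampIdx
  cases l with
  | nil => simp
  | cons x xs =>
    simp only []
    split_ifs with h1 h2 h3 h4 h5 h6 <;> simp_all
    · omega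
    · simp [List.dropLast_eq_take]

theorem dropLast_drop_one {α : Type} (r₀ : α) (rs : List α) :
    ((r₀ :: rs).dropLast).drop 1 = rs.dropLast := by
  cases rs with
  | nil => simp
  | cons r₁ rs' => simp [List.dropLast_cons₂]

-- the whole equivalence on the parsed grid: at least one row, every row at least as long as row 0
theorem core2 (sep : List (List String)) (h1 : 1 ≤ sep.length)
    (hlen : ∀ r ∈ sep, (sep.headD []).length ≤ r.length) :
    (PySem.List.pyRange 0 ((PySem.List.pyGetD sep 0 []).length : Int) 1).foldl (fun res j =>
      let curr : Int := (PySem.Int.ofStr? (PySem.List.pyGetD (PySem.List.pyGetD sep 0 []) j "")).getD 0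
      let isAdd : Bool := PySem.List.pyGetD (PySem.List.pyGetD sep ((sep.length : Int) - 1) []) j "" == "+"
      let curr := (PySem.List.pyRange 1 ((sep.length : Int) - 1) 1).foldl (fun curr i =>
        let v := (PySem.Int.ofStr? (PySem.List.pyGetD (PySem.List.pyGetD sep i []) j "")).getD 0
        if isAdd then curr + v else curr * v) curr
      res + curr) 0
    =
    (let ops := PySem.List.pyGetD sep (-1) []
     let sums := (PySem.List.pyGetD sep 0 []).map (fun x => (PySem.Int.ofStr? x).getD 0)
     let sp := (PySem.List.slice sep (some 1) (some (-1))).foldl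
       (fun (sp : List Int × List Int) row =>
         let vals := (PySem.List.slice row none (some (sp.1.length : Int))).map
           (fun x => (PySem.Int.ofStr? x).getD 0)
         (List.zipWith (· + ·) sp.1 vals, List.zipWith (· * ·) sp.2 vals))
       (sums, sums)
     (((sp.1.zip sp.2).zip ops)).foldl (fun t x => t + (if x.2 == "+" then x.1.1 else x.1.2)) 0) := by
  obtain _ | ⟨r₀, rs⟩ := sep
  · simp at h1
  have hne : (r₀ :: rs : List (List String)) ≠ [] := by simp
  have hhead : ((r₀ :: rs : List (List String)).headD []) = r₀ := rfl
  rw [hhead] at hlen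
  -- B side: normalise to a fold over range r₀.length
  have hds : ∀ r ∈ rs.dropLast, r₀.length ≤ r.length :=
    fun r hr => hlen r (List.mem_cons_of_mem _ (List.dropLast_subset _ hr))
  have hopslen : r₀.length ≤ ((r₀ :: rs : List (List String)).getLast hne).length :=
    hlen _ (List.getLast_mem hne)
  have hseed : (r₀.map (fun x => (PySem.Int.ofStr? x).getD 0))
      = (List.range r₀.length).map (fun j => pvVal r₀ j) := by
    rw [← map_int_take_eq_range r₀ r₀.length le_rfl, List.take_length]
  simp only [PySem.List.pyGetD_zero_cons, slice_one_neg_one, List.tail_cons,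
    PySem.List.pyGetD_neg_one _ _ hne]
  rw [hseed, foldB_invariant r₀.length _ hds]
  simp only []
  rw [show ∀ (l l' : List Int), l.zip l' = List.zipWith Prod.mk l l' from fun _ _ => rfl,
    zipWith_map_range Prod.mk,
    zip_map_range_left _ _ _ hopslen, List.foldl_map]
  -- A side: normalise the outer loop to the same fold over range r₀.length
  rw [PySem.List.pyRange_zero_natCast, List.foldl_map]
  apply PySem.List.foldl_congr_mem'
  intro j hj acc
  have hjc : j < r₀.length := List.mem_range.mp hj
  have hcast : ((r₀ :: rs : List (List String)).length : Int) - 1 = ((rs.length : Nat) : Int) := by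
    simp
  have hgetlast : (r₀ :: rs : List (List String)).getD rs.length [] =
      (r₀ :: rs).getLast hne := by
    rw [List.getD_eq_getElem?_getD, List.getElem?_eq_getElem (by simp)]
    simp only [List.getLast_eq_getElem, List.length_cons, Option.getD_some,
      Nat.add_sub_cancel]
    rfl
  -- the inner index loop of A is a fold over the data rows rs.dropLast
  have hinner : ∀ (P : Int → Int → Int) (c0 : Int),
      (PySem.List.pyRange 1 ((rs.length : Nat) : Int)).foldl
        (fun curr i => P curr ((PySem.Int.ofStr? ((PySem.List.pyGetD (r₀ :: rs) i []).getD j "")).getD 0)) c0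
      = (rs.dropLast).foldl
        (fun curr row => P curr ((PySem.Int.ofStr? (row.getD j "")).getD 0)) c0 := by
    intro P c0
    have hdl : ((r₀ :: rs : List (List String)).dropLast).length = rs.length := by simp
    rw [show ((rs.length : Nat) : Int) = (((r₀ :: rs : List (List String)).dropLast).length : Int) by rw [hdl]]
    rw [PySem.List.foldl_congr_mem' _ _
      (fun curr i => P curr ((PySem.Int.ofStr? ((PySem.List.pyGetD ((r₀ :: rs : List (List String)).dropLast) i []).getD j "")).getD 0))
      c0 ?_]
    · rw [PySem.List.foldl_pyRange_pyGetD' ((r₀ :: rs : List (List String)).dropLast) []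
        (fun curr row => P curr ((PySem.Int.ofStr? (row.getD j "")).getD 0)) c0 (by norm_num)]
      rw [show ((1:Int).toNat) = 1 from rfl, dropLast_drop_one]
    · intro i hi curr
      have hmem := PySem.List.mem_pyRange_one.mp hi
      have h0 : (0:Int) ≤ i := by omega
      have h2' : i < ((r₀ :: rs : List (List String)).length : Int) := by
        simp at hmem ⊢; omega
      simp only []
      rw [PySem.List.pyGetD_eq_getElem ((r₀ :: rs : List (List String)).dropLast) [] h0 hmem.2,
          PySem.List.pyGetD_eq_getElem (r₀ :: rs : List (List String)) [] h0 h2',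
          List.getElem_dropLast]
  simp only [hcast, PySem.List.pyGetD_natCast, hgetlast, pvVal]
  by_cases hb : (((r₀ :: rs).getLast hne).getD j "" == "+") = true
  · simp only [hb, if_true]
    congr 1
    exact hinner (fun a b => a + b) _
  · simp only [hb, Bool.false_eq_true, if_false]
    congr 1
    exact hinner (fun a b => a * b) _

-- ===== VERDICT (by name: the statement is the Claim_ definition above) =====
theorem part1_spec : Claim_equal_part1 := by
  intro data _ hpre
  unfold Pre_part1 at hpre
  obtain ⟨hne, hlen, -, -⟩ := hpre
  show part1 data = part1_alt data
  have h1 : 1 ≤ ((PySem.Str.splitlines data).map PySem.Str.split₀).length :=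
    List.length_pos_iff.mpr hne
  exact core2 _ h1 hlen
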